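-- pv_equiv track=rewrite | github.com/widdowquinn/aoc2025 | day02.py | get_invalid_ids_iter
-- ===== SOURCE A (Python) =====
-- def get_invalid_ids_iter(limits: tuple[int]) -> list[int]:
--     """Returns a list of invalid IDs in the passed range.
--
--     This approach iterates over all values in the range and keeps
--     a record of invalid values, those where the first and second
--     half of the id - as a string - is the same.
--     """
--     invalid = []  # list of invalid IDs
--
--     # Iterate over test values in the passed range
--     for val in range(limits[0], limits[1] + 1):
--         valstr = str(val)  # test value as string
--         vallen = len(valstr)  # length of test value as string
--         validx = vallen // 2  # length of twice-repeated unit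
--         if vallen % 2:  # Odd lengths can't be twice repeated sequences, so skip
--             continue
--         elif valstr[:validx] == valstr[validx:]:  # Test for repeat
--             invalid.append(val)
--
--     return invalid
-- ===== SOURCE B (Python) =====
-- def get_invalid_ids_iter(limits: tuple[int]) -> list[int]:
--     """Returns a list of invalid IDs in the passed range.
--
--     Instead of testing every value in the range, directly generate the
--     "doubled" numbers: a value is invalid exactly when it equals
--     h * (10**k + 1) for some k-digit number h (its string is the k-digit
--     string of h written twice).  For each half-length k that can fit under
--     the upper limit, emit the members of [lo, hi] in ascending order.
--     """
--     lo, hi = limits[0], limits[1]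
--     invalid = []
--     for k in range(1, len(str(hi)) // 2 + 1):
--         base = 10 ** k + 1
--         h_lo = max(10 ** (k - 1), -(-lo // base))   # ceil(lo / base)
--         h_hi = min(10 ** k - 1, hi // base)
--         for h in range(h_lo, h_hi + 1):
--             invalid.append(h * base)
--     return invalid
-- ===== Notes on version B (the rewrite author's own statement) =====
-- stated objective: alternative
-- what changed: Instead of scanning every value in [lo, hi] and string-testing each one, B directly generates the doubled numbers h*(10^k+1) for every half-length k that fits under hi, clipping the h-range to [lo, hi]; Pre_ only excludes tuples of fewer than two limits, on which A raises IndexError.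
import Mathlib
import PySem

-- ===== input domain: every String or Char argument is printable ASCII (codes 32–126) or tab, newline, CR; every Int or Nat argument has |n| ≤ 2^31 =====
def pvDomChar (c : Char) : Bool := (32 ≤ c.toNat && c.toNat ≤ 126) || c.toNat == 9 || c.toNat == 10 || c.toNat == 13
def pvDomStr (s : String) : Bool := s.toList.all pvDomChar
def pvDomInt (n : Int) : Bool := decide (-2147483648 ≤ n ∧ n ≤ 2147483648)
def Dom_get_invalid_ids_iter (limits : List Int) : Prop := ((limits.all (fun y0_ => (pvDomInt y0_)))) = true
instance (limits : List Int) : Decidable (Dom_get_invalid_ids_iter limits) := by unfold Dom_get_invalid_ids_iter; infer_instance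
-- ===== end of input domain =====

-- B replaces A's scan of every value in [lo, hi] by directly generating the doubled
-- numbers h*(10^k+1) for each half-length k that fits under hi (a different algorithm).

-- ===== PORT A =====
def get_invalid_ids_iter (limits : List Int) : List Int :=
  match PySem.List.pyGet? limits 0 with
  | none => []  -- unreachable under Pre_ (limits[0] raises IndexError)
  | some lo =>
    match PySem.List.pyGet? limits 1 with
    | none => []  -- unreachable under Pre_ (limits[1] raises IndexError)
    | some hi =>
      (PySem.List.pyRange lo (hi + 1) 1).foldl (fun invalid val =>
        let valstr := PySem.Int.toChars val
        let vallen : Int := (valstr.length : Int)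
        let validx : Int := PySem.Int.floordiv vallen 2
        if PySem.Int.mod vallen 2 ≠ 0 then invalid
        else if PySem.Chars.slice valstr none (some validx) = PySem.Chars.slice valstr (some validx) none
          then invalid ++ [val]
        else invalid) []

-- ===== PORT B =====
-- exponents: Python's 10 ** k / 10 ** (k - 1) with k ≥ 1 from range(1, …) → Nat exponents k.toNat, k.toNat - 1
def get_invalid_ids_iter_alt (limits : List Int) : List Int :=
  match PySem.List.pyGet? limits 0 with
  | none => []  -- unreachable under Pre_
  | some lo =>
    match PySem.List.pyGet? limits 1 with
    | none => []  -- unreachable under Pre_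
    | some hi =>
      (PySem.List.pyRange 1 (PySem.Int.floordiv ((PySem.Int.toChars hi).length : Int) 2 + 1) 1).foldl
        (fun invalid k =>
          let base : Int := 10 ^ k.toNat + 1
          let hLo : Int := max (10 ^ (k.toNat - 1)) (-(PySem.Int.floordiv (-lo) base))
          let hHi : Int := min (10 ^ k.toNat - 1) (PySem.Int.floordiv hi base)
          invalid ++ (PySem.List.pyRange hLo (hHi + 1) 1).map (fun h => h * base)) []

-- ===== PRECONDITION & SPEC =====
-- Pre_ excludes only tuples of fewer than two limits, on which A raises IndexError.
def Pre_get_invalid_ids_iter (limits : List Int) : Prop := 2 ≤ limits.length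
instance (limits : List Int) : Decidable (Pre_get_invalid_ids_iter limits) := by
  unfold Pre_get_invalid_ids_iter; infer_instance
def pvWitness_get_invalid_ids_iter : List Int := [998, 125000]

def Spec_get_invalid_ids_iter (limits : List Int) (out : List Int) : Prop := out = get_invalid_ids_iter_alt limits
instance (limits : List Int) (out : List Int) : Decidable (Spec_get_invalid_ids_iter limits out) := by unfold Spec_get_invalid_ids_iter; infer_instance

-- ===== CLAIM (what is proved, stated in full; the proofs are below) =====
def Claim_equal_get_invalid_ids_iter : Prop := ∀ (limits : List Int), Dom_get_invalid_ids_iter limits → Pre_get_invalid_ids_iter limits → Spec_get_invalid_ids_iter limits (get_invalid_ids_iter limits)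

-- ===== LEMMAS AND PROOFS =====

-- The string test of A, as a predicate on one value (abbrev: Decidable is found structurally)
abbrev pStr (v : Int) : Prop :=
  PySem.Int.mod ((PySem.Int.toChars v).length : Int) 2 = 0 ∧
  PySem.Chars.slice (PySem.Int.toChars v) none
      (some (PySem.Int.floordiv ((PySem.Int.toChars v).length : Int) 2)) =
    PySem.Chars.slice (PySem.Int.toChars v)
      (some (PySem.Int.floordiv ((PySem.Int.toChars v).length : Int) 2)) none

-- The arithmetic characterisation behind B: v's decimal string is some k-digit string doubled
def pArith (v : Int) : Prop :=
  ∃ (k : ℕ) (h : Int), 1 ≤ k ∧ (10 : Int) ^ (k - 1) ≤ h ∧ h < 10 ^ k ∧ v = h * (10 ^ k + 1)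

-- One k-block of B's generator
def blockB (lo hi : Int) (k : Int) : List Int :=
  (PySem.List.pyRange (max (10 ^ (k.toNat - 1)) (-(PySem.Int.floordiv (-lo) (10 ^ k.toNat + 1))))
     (min (10 ^ k.toNat - 1) (PySem.Int.floordiv hi (10 ^ k.toNat + 1)) + 1) 1).map
    (fun h => h * (10 ^ k.toNat + 1))

-- two strictly increasing lists with the same members are equal
theorem sorted_lists_eq : ∀ (l₁ l₂ : List Int), l₁.Pairwise (· < ·) → l₂.Pairwise (· < ·) →
    (∀ v, v ∈ l₁ ↔ v ∈ l₂) → l₁ = l₂ := by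
  intro l₁
  induction l₁ with
  | nil =>
    intro l₂ _ _ hm
    cases l₂ with
    | nil => rfl
    | cons b t2 => exact absurd ((hm b).mpr (by simp)) (by simp)
  | cons a t ih =>
    intro l₂ h1 h2 hm
    cases l₂ with
    | nil => exact absurd ((hm a).mp (by simp)) (by simp)
    | cons b t2 =>
      rcases List.pairwise_cons.mp h1 with ⟨ha, hpt⟩
      rcases List.pairwise_cons.mp h2 with ⟨hb, hpt2⟩
      have hab : a = b := by
        rcases List.mem_cons.mp ((hm a).mp (by simp)) with h | h
        · exact h
        · rcases List.mem_cons.mp ((hm b).mpr (by simp)) with h' | h'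
          · exact h'.symm
          · exact absurd (lt_trans (hb a h) (ha b h')) (lt_irrefl b)
      subst hab
      have ht : t = t2 := by
        apply ih t2 hpt hpt2
        intro v
        constructor
        · intro hv
          rcases List.mem_cons.mp ((hm v).mp (by simp [hv])) with h | h
          · exact absurd (h ▸ ha v hv) (lt_irrefl a)
          · exact h
        · intro hv
          rcases List.mem_cons.mp ((hm v).mpr (by simp [hv])) with h | h
          · exact absurd (h ▸ hb v hv) (lt_irrefl a)
          · exact h
      rw [ht]

theorem toDigitsCore_eq (fuel : ℕ) : ∀ (n : ℕ) (acc : List Char), n ≠ 0 → n < 10 ^ fuel →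
    Nat.toDigitsCore 10 fuel n acc = ((Nat.digits 10 n).map Nat.digitChar).reverse ++ acc := by
  induction fuel with
  | zero => intro n acc hn hlt; simp at hlt; omega
  | succ f ih =>
    intro n acc hn hlt
    rw [Nat.toDigitsCore]
    rw [Nat.digits_def' (by norm_num : 1 < 10) (Nat.pos_of_ne_zero hn)]
    by_cases h0 : n / 10 = 0
    · rw [if_pos h0, h0, Nat.digits_zero]
      simp
    · rw [if_neg h0, ih (n / 10) _ h0 (by rw [pow_succ] at hlt; omega)]
      simp

theorem toDigits10_eq (n : ℕ) :
    Nat.toDigits 10 n = if n = 0 then ['0'] else ((Nat.digits 10 n).map Nat.digitChar).reverse := by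
  by_cases hn : n = 0
  · subst hn; decide
  · rw [if_neg hn]
    have h1 : n < 10 ^ (n + 1) := by
      calc n < 10 ^ n := Nat.lt_pow_self (by norm_num)
      _ ≤ 10 ^ (n + 1) := Nat.pow_le_pow_right (by norm_num) (by omega)
    have := toDigitsCore_eq (n + 1) n [] hn h1
    rw [Nat.toDigits, this, List.append_nil]

theorem digitChar_toNat {d : ℕ} (hd : d < 10) : (Nat.digitChar d).toNat = d + 48 := by
  interval_cases d <;> decide

theorem digitChar_ne_dash {d : ℕ} (hd : d < 10) : Nat.digitChar d ≠ '-' := by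
  intro h
  have := digitChar_toNat hd
  rw [h] at this
  simp [Char.toNat] at this

theorem toDigits_ne_dash {n : ℕ} {c : Char} (hc : c ∈ Nat.toDigits 10 n) : c ≠ '-' := by
  rw [toDigits10_eq] at hc
  by_cases hn : n = 0
  · rw [if_pos hn] at hc; simp at hc; subst hc; decide
  · rw [if_neg hn] at hc
    rcases List.mem_map.mp (List.mem_reverse.mp hc) with ⟨d, hd, rfl⟩
    exact digitChar_ne_dash (Nat.digits_lt_base (by norm_num) hd)

theorem map_digitChar_inj : ∀ (l₁ l₂ : List ℕ), (∀ d ∈ l₁, d < 10) → (∀ d ∈ l₂, d < 10) →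
    l₁.map Nat.digitChar = l₂.map Nat.digitChar → l₁ = l₂ := by
  intro l₁
  induction l₁ with
  | nil => intro l₂ _ _ h; cases l₂ <;> simp_all
  | cons a t ih =>
    intro l₂ h1 h2 h
    cases l₂ with
    | nil => simp_all
    | cons b t2 =>
      simp only [List.map_cons, List.cons.injEq] at h
      have hab : a = b := by
        have ha := h1 a (by simp)
        have hb := h2 b (by simp)
        have e1 := digitChar_toNat ha
        have e2 := digitChar_toNat hb
        rw [h.1] at e1
        omega
      rw [hab, ih t2 (fun d hd => h1 d (by simp [hd])) (fun d hd => h2 d (by simp [hd])) h.2]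

theorem pStr_elim (v : Int) : pStr v ↔
    ((PySem.Int.toChars v).length % 2 = 0 ∧
     (PySem.Int.toChars v).take ((PySem.Int.toChars v).length / 2) =
       (PySem.Int.toChars v).drop ((PySem.Int.toChars v).length / 2)) := by
  unfold pStr
  have hmod : PySem.Int.mod (((PySem.Int.toChars v).length : ℕ) : Int) 2 =
      (((PySem.Int.toChars v).length % 2 : ℕ) : Int) := by
    exact_mod_cast PySem.Int.mod_natCast (PySem.Int.toChars v).length 2
  have hdiv : PySem.Int.floordiv (((PySem.Int.toChars v).length : ℕ) : Int) 2 =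
      (((PySem.Int.toChars v).length / 2 : ℕ) : Int) := by
    exact_mod_cast PySem.Int.floordiv_natCast (PySem.Int.toChars v).length 2
  rw [hmod, hdiv]
  rw [PySem.Chars.slice_eq_listSlice, PySem.Chars.slice_eq_listSlice,
      PySem.List.slice_to _ (by positivity), PySem.List.slice_from _ (by positivity)]
  exact ⟨fun ⟨h1, h2⟩ => ⟨by exact_mod_cast h1, h2⟩, fun ⟨h1, h2⟩ => ⟨by exact_mod_cast h1, h2⟩⟩

theorem pArith_pos {v : Int} (h : pArith v) : 11 ≤ v := by
  rcases h with ⟨k, h, hk, hlo, hhi, rfl⟩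
  have h1 : (1 : Int) ≤ h := le_trans (one_le_pow₀ (by norm_num)) hlo
  have h2 : (10 : Int) ≤ 10 ^ k := by
    calc (10:Int) = 10 ^ 1 := (pow_one _).symm
    _ ≤ 10 ^ k := pow_le_pow_right₀ (by norm_num) hk
  nlinarith

theorem pStr_iff_pArith (v : Int) : pStr v ↔ pArith v := by
  rw [pStr_elim]
  constructor
  · rintro ⟨heven, hhalf⟩
    by_cases hneg : v < 0
    · exfalso
      have hs : PySem.Int.toChars v = '-' :: Nat.toDigits 10 v.natAbs := by
        simp [PySem.Int.toChars, hneg]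
      rw [hs] at heven hhalf
      have hds1 : Nat.toDigits 10 v.natAbs ≠ [] := by
        rw [toDigits10_eq]
        split
        · simp
        · simp only [ne_eq, List.reverse_eq_nil_iff, List.map_eq_nil_iff]
          exact Nat.digits_ne_nil_iff_ne_zero.mpr ‹_›
      have hds1' : 1 ≤ (Nat.toDigits 10 v.natAbs).length := List.length_pos_iff.mpr hds1
      simp only [List.length_cons] at heven hhalf
      obtain ⟨j, hj⟩ : ∃ j, ((Nat.toDigits 10 v.natAbs).length + 1) / 2 = j + 1 :=
        ⟨((Nat.toDigits 10 v.natAbs).length + 1) / 2 - 1, by omega⟩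
      rw [hj, List.take_succ_cons, List.drop_succ_cons] at hhalf
      have hmem : '-' ∈ List.drop j (Nat.toDigits 10 v.natAbs) := by rw [← hhalf]; simp
      exact toDigits_ne_dash (List.mem_of_mem_drop hmem) rfl
    · push_neg at hneg
      have hs : PySem.Int.toChars v = Nat.toDigits 10 v.toNat := by
        simp [PySem.Int.toChars, not_lt.mpr hneg]
      by_cases hm0 : v.toNat = 0
      · exfalso; rw [hs, hm0] at heven; revert heven; decide
      · rw [hs, toDigits10_eq, if_neg hm0] at heven hhalf
        set D := Nat.digits 10 v.toNat with hD
        set n := D.length with hn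
        simp only [List.length_reverse, List.length_map, ← hn] at heven hhalf
        set k := n / 2 with hk
        have hn2 : n = 2 * k := by omega
        have hk1 : 1 ≤ k := by
          have h1 : D ≠ [] := Nat.digits_ne_nil_iff_ne_zero.mpr hm0
          have := List.length_pos_iff.mpr h1
          omega
        rw [List.take_reverse, List.drop_reverse] at hhalf
        simp only [List.length_map, ← hn] at hhalf
        have hnk : n - k = k := by omega
        rw [hnk] at hhalf
        have hhalf' : List.drop k (D.map Nat.digitChar) = List.take k (D.map Nat.digitChar) :=
          List.reverse_injective hhalf
        rw [← List.map_drop, ← List.map_take] at hhalf'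
        have hDd : D.drop k = D.take k :=
          map_digitChar_inj _ _
            (fun d hd => Nat.digits_lt_base (by norm_num) (List.mem_of_mem_drop hd))
            (fun d hd => Nat.digits_lt_base (by norm_num) (List.take_subset _ _ hd)) hhalf'
        have hsplit : D = D.take k ++ D.take k := by
          conv_lhs => rw [← List.take_append_drop k D]
          rw [hDd]
        set t := D.take k with ht
        have htlen : t.length = k := by
          rw [ht, List.length_take]
          omega
        have htne : t ≠ [] := by
          intro h0; rw [h0] at htlen; simp at htlen; omega
        have hDne : D ≠ [] := Nat.digits_ne_nil_iff_ne_zero.mpr hm0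
        have hlast : t.getLast htne ≠ 0 := by
          have hDl : D.getLast? = t.getLast? := by
            rw [hsplit, List.getLast?_append, Option.or_self]
          rw [List.getLast?_eq_some_getLast hDne, List.getLast?_eq_some_getLast htne] at hDl
          simp only [Option.some.injEq] at hDl
          intro h0
          have h1 : D.getLast hDne = 0 := by rw [hDl, h0]
          exact Nat.getLast_digit_ne_zero 10 hm0 h1
        have hdig : Nat.digits 10 (Nat.ofDigits 10 t) = t :=
          Nat.digits_ofDigits 10 (by norm_num) t
            (fun l hl => Nat.digits_lt_base (by norm_num) (List.take_subset _ _ hl))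
            (fun _ => hlast)
        set h := Nat.ofDigits 10 t with hh
        have hmh : v.toNat = h + 10 ^ k * h := by
          conv_lhs => rw [← Nat.ofDigits_digits 10 v.toNat, ← hD, hsplit]
          rw [Nat.ofDigits_append, htlen]
        have hub : h < 10 ^ k := by
          have : (Nat.digits 10 h).length ≤ k := by rw [hdig, htlen]
          exact (Nat.digits_length_le_iff (by norm_num) h).mp this
        have hlb : 10 ^ (k - 1) ≤ h := by
          by_contra hlt
          push_neg at hlt
          have := (Nat.digits_length_le_iff (by norm_num) h).mpr hlt
          rw [hdig, htlen] at this
          omega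
        refine ⟨k, (h : Int), hk1, by exact_mod_cast hlb, by exact_mod_cast hub, ?_⟩
        have hv : v = (v.toNat : Int) := (Int.toNat_of_nonneg hneg).symm
        rw [hv, hmh]
        push_cast
        ring
  · intro hA
    have hv11 := pArith_pos hA
    rcases hA with ⟨k, h, hk1, hlb, hub, hveq⟩
    have hpos : (0:Int) < h := lt_of_lt_of_le (by positivity) hlb
    have hvpos : (0:Int) < v := by omega
    have hs : PySem.Int.toChars v = Nat.toDigits 10 v.toNat := by
      simp [PySem.Int.toChars, not_lt.mpr (le_of_lt hvpos)]
    have hm0 : v.toNat ≠ 0 := by omega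
    have hcast : (h.toNat : Int) = h := Int.toNat_of_nonneg (le_of_lt hpos)
    set hn := h.toNat with hhn
    have hmn : v.toNat = hn * (10 ^ k + 1) := by
      have e : (v.toNat : Int) = (hn : Int) * ((10:Int) ^ k + 1) := by
        rw [hcast, Int.toNat_of_nonneg (le_of_lt hvpos), hveq]
      exact_mod_cast e
    have hlbn : 10 ^ (k - 1) ≤ hn := by exact_mod_cast hcast ▸ hlb
    have hubn : hn < 10 ^ k := by exact_mod_cast hcast ▸ hub
    have hhn0 : hn ≠ 0 := by
      have h1 : 1 ≤ 10 ^ (k - 1) := Nat.one_le_pow _ _ (by norm_num)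
      omega
    set D := Nat.digits 10 hn with hD
    have hlen : D.length = k := by
      have hle : D.length ≤ k := (Nat.digits_length_le_iff (by norm_num) hn).mpr hubn
      have hgt : ¬ D.length ≤ k - 1 := fun hc =>
        absurd ((Nat.digits_length_le_iff (by norm_num) hn).mp hc) (not_lt.mpr hlbn)
      omega
    have hDm : Nat.digits 10 v.toNat = D ++ D := by
      have e := Nat.digits_append_digits (b := 10) (n := hn) (m := hn) (by norm_num)
      rw [← hD, hlen] at e
      rw [hmn, e]
      congr 1
      ring
    have hsD : PySem.Int.toChars v = ((D ++ D).map Nat.digitChar).reverse := by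
      rw [hs, toDigits10_eq, if_neg hm0, hDm]
    rw [hsD]
    have hlen2 : (((D ++ D).map Nat.digitChar).reverse).length = 2 * k := by
      simp [hlen, two_mul]
    rw [hlen2]
    refine ⟨by omega, ?_⟩
    have hdivk : 2 * k / 2 = k := by omega
    rw [hdivk, List.take_reverse, List.drop_reverse]
    simp only [List.length_map, List.length_append, hlen, Nat.add_sub_cancel]
    rw [show (D ++ D).map Nat.digitChar = D.map Nat.digitChar ++ D.map Nat.digitChar from by simp]
    rw [List.drop_left' (by simp [hlen]), List.take_left' (by simp [hlen])]

theorem two_k_le_len {hi : Int} {k : ℕ} (hk : 1 ≤ k) (hv : (10 : Int) ^ (2 * k - 1) ≤ hi) :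
    2 * k ≤ (PySem.Int.toChars hi).length := by
  have hpos : (0:Int) < hi := lt_of_lt_of_le (by positivity) hv
  have hs : PySem.Int.toChars hi = Nat.toDigits 10 hi.toNat := by
    simp [PySem.Int.toChars, not_lt.mpr (le_of_lt hpos)]
  have hm0 : hi.toNat ≠ 0 := by omega
  rw [hs, toDigits10_eq, if_neg hm0]
  simp only [List.length_reverse, List.length_map]
  have hn : 10 ^ (2 * k - 1) ≤ hi.toNat := by
    have e : (hi.toNat : Int) = hi := Int.toNat_of_nonneg (le_of_lt hpos)
    exact_mod_cast e ▸ hv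
  by_contra hc
  push_neg at hc
  have := (Nat.digits_length_le_iff (b := 10) (k := 2 * k - 1) (by norm_num) hi.toNat).mp (by omega)
  omega

theorem mem_blockB {lo hi v : Int} {k : Int} (hk : 1 ≤ k) :
    v ∈ blockB lo hi k ↔ ∃ h : Int, (10 : Int) ^ (k.toNat - 1) ≤ h ∧ h < 10 ^ k.toNat ∧
      lo ≤ v ∧ v ≤ hi ∧ v = h * (10 ^ k.toNat + 1) := by
  unfold blockB
  have hbase : (0:Int) < 10 ^ k.toNat + 1 := by positivity
  simp only [List.mem_map, PySem.List.mem_pyRange_one]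
  constructor
  · rintro ⟨h, ⟨hge, hlt⟩, rfl⟩
    rcases max_le_iff.mp hge with ⟨h1, h2⟩
    rcases le_min_iff.mp (by omega : h ≤ min (10 ^ k.toNat - 1) (PySem.Int.floordiv hi (10 ^ k.toNat + 1))) with ⟨h3, h4⟩
    refine ⟨h, h1, by omega, ?_, ?_, rfl⟩
    · have := (PySem.Int.le_floordiv_iff_mul_le (a := -lo) (b := 10 ^ k.toNat + 1) (q := -h) hbase).mp (by omega)
      nlinarith
    · exact (PySem.Int.le_floordiv_iff_mul_le (a := hi) (b := 10 ^ k.toNat + 1) (q := h) hbase).mp h4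
  · rintro ⟨h, h1, h2, h3, h4, rfl⟩
    refine ⟨h, ⟨max_le_iff.mpr ⟨h1, ?_⟩, ?_⟩, rfl⟩
    · have : -h ≤ PySem.Int.floordiv (-lo) (10 ^ k.toNat + 1) :=
        (PySem.Int.le_floordiv_iff_mul_le hbase).mpr (by nlinarith)
      omega
    · have : h ≤ PySem.Int.floordiv hi (10 ^ k.toNat + 1) :=
        (PySem.Int.le_floordiv_iff_mul_le hbase).mpr h4
      omega

theorem mem_B_iff (lo hi v : Int) :
    v ∈ (PySem.List.pyRange 1 (PySem.Int.floordiv ((PySem.Int.toChars hi).length : Int) 2 + 1) 1).flatMap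
        (blockB lo hi) ↔ lo ≤ v ∧ v ≤ hi ∧ pArith v := by
  rw [List.mem_flatMap]
  constructor
  · rintro ⟨k, hkmem, hv⟩
    have hk1 : 1 ≤ k := ((PySem.List.mem_pyRange_one).mp hkmem).1
    rcases (mem_blockB hk1).mp hv with ⟨h, hge, hlt, hlo, hhi, rfl⟩
    exact ⟨hlo, hhi, k.toNat, h, by omega, hge, hlt, rfl⟩
  · rintro ⟨hlo, hhi, k, h, hk1, hge, hlt, rfl⟩
    have hbig : (10:Int) ^ (2 * k - 1) ≤ hi := by
      have e : (10:Int) ^ (2 * k - 1) = 10 ^ (k - 1) * 10 ^ k := by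
        rw [← pow_add]; congr 1; omega
      have p0 : (0:Int) < 10 ^ k := by positivity
      have hp : (0:Int) < h := lt_of_lt_of_le (by positivity) hge
      nlinarith
    have hlen := two_k_le_len hk1 hbig
    have hfd : PySem.Int.floordiv (((PySem.Int.toChars hi).length : ℕ) : Int) 2 =
        (((PySem.Int.toChars hi).length / 2 : ℕ) : Int) := by
      exact_mod_cast PySem.Int.floordiv_natCast (PySem.Int.toChars hi).length 2
    refine ⟨(k : Int), PySem.List.mem_pyRange_one.mpr ⟨by exact_mod_cast hk1, ?_⟩, ?_⟩
    · rw [hfd]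
      have : k ≤ (PySem.Int.toChars hi).length / 2 := by omega
      omega
    · have hkk : ((k : Int)).toNat = k := Int.toNat_natCast k
      rw [mem_blockB (by exact_mod_cast hk1), hkk]
      exact ⟨h, hge, hlt, hlo, hhi, rfl⟩

theorem pairwise_B (lo hi : Int) :
    ((PySem.List.pyRange 1 (PySem.Int.floordiv ((PySem.Int.toChars hi).length : Int) 2 + 1) 1).flatMap
        (blockB lo hi)).Pairwise (· < ·) := by
  rw [List.pairwise_flatMap]
  constructor
  · intro k _
    unfold blockB
    rw [List.pairwise_map]
    exact List.Pairwise.imp (fun hab => by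
        exact mul_lt_mul_of_pos_right hab (by positivity))
      (PySem.List.pairwise_lt_pyRange_one _ _)
  · apply List.Pairwise.imp_of_mem ?_ (PySem.List.pairwise_lt_pyRange_one _ _)
    intro k1 k2 hm1 hm2 hlt x hx y hy
    have h11 : 1 ≤ k1 := (PySem.List.mem_pyRange_one.mp hm1).1
    have h21 : 1 ≤ k2 := (PySem.List.mem_pyRange_one.mp hm2).1
    rcases (mem_blockB h11).mp hx with ⟨a, hage, halt, _, _, rfl⟩
    rcases (mem_blockB h21).mp hy with ⟨b, hbge, hblt, _, _, rfl⟩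
    have hkt : k1.toNat < k2.toNat := by omega
    have p1 : (0:Int) < 10 ^ k1.toNat := by positivity
    have p2 : (0:Int) < 10 ^ k2.toNat := by positivity
    have p3 : (0:Int) < 10 ^ (k2.toNat - 1) := by positivity
    have e1 : a * (10 ^ k1.toNat + 1) ≤ (10 ^ k1.toNat - 1) * (10 ^ k1.toNat + 1) :=
      mul_le_mul_of_nonneg_right (by omega) (by positivity)
    have e3 : (10:Int) ^ k1.toNat * 10 ^ k1.toNat = 10 ^ (2 * k1.toNat) := by
      rw [← pow_add]; congr 1; omega
    have f1 : (10:Int) ^ (k2.toNat - 1) * 10 ^ k2.toNat = 10 ^ (2 * k2.toNat - 1) := by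
      rw [← pow_add]; congr 1; omega
    have f2 : (10:Int) ^ (k2.toNat - 1) * (10 ^ k2.toNat + 1) ≤ b * (10 ^ k2.toNat + 1) :=
      mul_le_mul_of_nonneg_right hbge (by positivity)
    have g : (10:Int) ^ (2 * k1.toNat) < 10 ^ (2 * k2.toNat - 1) :=
      pow_lt_pow_right₀ (by norm_num) (by omega)
    nlinarith

theorem A_eq_filter (lo hi : Int) :
    (PySem.List.pyRange lo (hi + 1) 1).foldl (fun invalid val =>
        let valstr := PySem.Int.toChars val
        let vallen : Int := (valstr.length : Int)
        let validx : Int := PySem.Int.floordiv vallen 2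
        if PySem.Int.mod vallen 2 ≠ 0 then invalid
        else if PySem.Chars.slice valstr none (some validx) = PySem.Chars.slice valstr (some validx) none
          then invalid ++ [val]
        else invalid) [] =
      (PySem.List.pyRange lo (hi + 1) 1).filter (fun v => decide (pStr v)) := by
  rw [PySem.List.foldl_congr_mem _ _ (fun invalid val => if pStr val then invalid ++ [val] else invalid) []
      (by
        intro acc x _
        simp only [pStr]
        split_ifs <;> first | rfl | tauto)]
  rw [PySem.List.foldl_append_ite_eq_filter pStr]
  simp

theorem B_eq_flatMap (lo hi : Int) :
    (PySem.List.pyRange 1 (PySem.Int.floordiv ((PySem.Int.toChars hi).length : Int) 2 + 1) 1).foldl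
        (fun invalid k =>
          let base : Int := 10 ^ k.toNat + 1
          let hLo : Int := max (10 ^ (k.toNat - 1)) (-(PySem.Int.floordiv (-lo) base))
          let hHi : Int := min (10 ^ k.toNat - 1) (PySem.Int.floordiv hi base)
          invalid ++ (PySem.List.pyRange hLo (hHi + 1) 1).map (fun h => h * base)) [] =
      (PySem.List.pyRange 1 (PySem.Int.floordiv ((PySem.Int.toChars hi).length : Int) 2 + 1) 1).flatMap
        (blockB lo hi) := by
  rw [show (fun (invalid : List Int) (k : Int) =>
          let base : Int := 10 ^ k.toNat + 1
          let hLo : Int := max (10 ^ (k.toNat - 1)) (-(PySem.Int.floordiv (-lo) base))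
          let hHi : Int := min (10 ^ k.toNat - 1) (PySem.Int.floordiv hi base)
          invalid ++ (PySem.List.pyRange hLo (hHi + 1) 1).map (fun h => h * base)) =
        (fun invalid k => invalid ++ blockB lo hi k) from rfl]
  rw [PySem.List.foldl_append_eq_flatMap (blockB lo hi)]
  simp

theorem core_eq (lo hi : Int) :
    (PySem.List.pyRange lo (hi + 1) 1).filter (fun v => decide (pStr v)) =
      (PySem.List.pyRange 1 (PySem.Int.floordiv ((PySem.Int.toChars hi).length : Int) 2 + 1) 1).flatMap
        (blockB lo hi) := by
  apply sorted_lists_eq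
  · exact (PySem.List.pairwise_lt_pyRange_one _ _).filter _
  · exact pairwise_B lo hi
  · intro v
    rw [List.mem_filter, mem_B_iff]
    constructor
    · rintro ⟨hm, hp⟩
      have h1 := PySem.List.mem_pyRange_one.mp hm
      exact ⟨h1.1, by omega, (pStr_iff_pArith v).mp (of_decide_eq_true hp)⟩
    · rintro ⟨h1, h2, h3⟩
      exact ⟨PySem.List.mem_pyRange_one.mpr ⟨h1, by omega⟩,
        decide_eq_true ((pStr_iff_pArith v).mpr h3)⟩

-- ===== VERDICT (by name: the statement is the Claim_ definition above) =====
theorem get_invalid_ids_iter_spec : Claim_equal_get_invalid_ids_iter := by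
  intro limits _ hpre
  unfold Pre_get_invalid_ids_iter at hpre
  unfold Spec_get_invalid_ids_iter
  match limits, hpre with
  | a :: b :: rest, _ =>
    unfold get_invalid_ids_iter get_invalid_ids_iter_alt
    have h0 : PySem.List.pyGet? (a :: b :: rest) (0 : Int) = some a := by
      have h : (0:Int) ≤ (rest.length : Int) + 1 := by positivity
      simp [PySem.List.pyGet?, PySem.List.pyIdx?, h]
    have h1 : PySem.List.pyGet? (a :: b :: rest) (1 : Int) = some b := by
      simp [PySem.List.pyGet?, PySem.List.pyIdx?]
    rw [h0, h1]
    simp only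
    rw [A_eq_filter, B_eq_flatMap, core_eq]
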